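-- pv_equiv track=rewrite | github.com/ODiogoSilva/TriFusion | ortho/orthomcl_toolbox_old.py | frequency_filter
-- ===== SOURCE A (Python) =====
-- def frequency_filter (species_frequency_dic,gene_threshold,sp_threshold, taxa_subset, taxa_strict):
-- 	""" Function that filters clusters with gene copy numbers that exceed a given threshold. It also returns a list of the species with gene copy numbers that violate the threshold """
-- 	gene_frequency_flag = 0 # If the value of this flag is changed, then the gene frequency of one or more species is above the threshold
-- 	sp_frequency_flag = 0
-- 	#Basidiomycota_only = [species for species in species_frequency_dic.keys() if species in Basidiomycota_list or Basidio_EST_list]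
--
-- 	if taxa_subset != None: # If the user has specified a taxa set, then the species threshold should apply to that subset only
-- 		focal_species = [sp for sp in taxa_subset if sp in species_frequency_dic]
-- 	else:
-- 		focal_species = species_frequency_dic.keys()
--
-- 	if len(focal_species) <= int(sp_threshold):
-- 			sp_frequency_flag += 1
-- 	for species,frequency in species_frequency_dic.items():
-- 		if taxa_strict == None and species in taxa_subset:
-- 			return 0, sp_frequency_flag
-- 		else:
-- 			if frequency > int(gene_threshold):
-- 				gene_frequency_flag += 1
-- 	return gene_frequency_flag,sp_frequency_flag
-- ===== SOURCE B (Python) =====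
-- def frequency_filter(species_frequency_dic, gene_threshold, sp_threshold, taxa_subset, taxa_strict):
--     if taxa_subset != None:
--         focal_species = [sp for sp in taxa_subset if sp in species_frequency_dic]
--     else:
--         focal_species = species_frequency_dic.keys()
--     sp_frequency_flag = 1 if len(focal_species) <= int(sp_threshold) else 0
--     # set-based overlap test: short-circuit as soon as any cluster species lies in the subset
--     if taxa_strict == None and species_frequency_dic and not set(species_frequency_dic).isdisjoint(taxa_subset):
--         return 0, sp_frequency_flag
--     # count violations by sorting the frequencies descending and measuring the > threshold prefix
--     vals = sorted(species_frequency_dic.values(), reverse=True)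
--     gene_frequency_flag = 0
--     while gene_frequency_flag < len(vals) and vals[gene_frequency_flag] > int(gene_threshold):
--         gene_frequency_flag += 1
--     return gene_frequency_flag, sp_frequency_flag
-- ===== Notes on version B (the rewrite author's own statement) =====
-- stated objective: alternative
-- what changed: A's single interleaved loop (early-return subset check mixed with incremental counting) is replaced by a set-disjointness test between the cluster's species and the taxa subset, followed by sorting the gene frequencies in descending order and counting violations as the length of the > threshold prefix; it trades A's linear interleaved count for a set operation plus an O(n log n) sort-and-scan.
-- outside the precondition, e.g. on frequency_filter({'a': 1}, 0, 0, None, None): A raises TypeError, B raises TypeError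
import Mathlib
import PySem

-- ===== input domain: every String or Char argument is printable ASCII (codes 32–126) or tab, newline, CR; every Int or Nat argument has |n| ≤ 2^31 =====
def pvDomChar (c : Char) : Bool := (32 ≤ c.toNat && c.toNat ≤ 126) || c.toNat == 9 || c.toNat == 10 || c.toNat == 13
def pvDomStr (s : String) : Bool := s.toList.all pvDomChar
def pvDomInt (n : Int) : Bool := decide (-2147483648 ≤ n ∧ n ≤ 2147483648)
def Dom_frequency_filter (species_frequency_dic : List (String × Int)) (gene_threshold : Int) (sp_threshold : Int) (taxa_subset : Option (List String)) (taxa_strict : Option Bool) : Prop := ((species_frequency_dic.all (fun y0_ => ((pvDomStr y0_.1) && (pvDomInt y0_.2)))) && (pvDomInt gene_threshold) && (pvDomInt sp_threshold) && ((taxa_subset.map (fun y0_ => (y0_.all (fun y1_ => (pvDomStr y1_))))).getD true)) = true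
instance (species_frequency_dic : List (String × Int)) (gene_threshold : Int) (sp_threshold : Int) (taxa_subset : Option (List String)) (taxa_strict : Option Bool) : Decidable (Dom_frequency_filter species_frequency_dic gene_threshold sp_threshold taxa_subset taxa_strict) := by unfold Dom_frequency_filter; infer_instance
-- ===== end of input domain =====

-- B replaces A's interleaved early-return loop by a set-disjointness overlap test plus a
-- sort-descending-then-scan-the-prefix count of the threshold violations (objective: alternative).

-- ===== PORT A =====
-- A's for-loop over species_frequency_dic.items(); 'species in taxa_subset' is modelled by
-- (taxa_subset.getD []).contains: exact whenever taxa_subset ≠ none; the case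
-- taxa_strict = none ∧ taxa_subset = none with a non-empty dict (Python TypeError) is excluded by Pre_.
def pvLoopA (rest : List (String × Int)) (gene_threshold : Int) (taxa_subset : Option (List String)) (taxa_strict : Option Bool) (sp_flag : Int) (gene_flag : Int) : Int × Int :=
  match rest with
  | [] => (gene_flag, sp_flag)
  | (species, frequency) :: t =>
    if taxa_strict = none ∧ (taxa_subset.getD []).contains species then
      (0, sp_flag)
    else if frequency > gene_threshold then
      pvLoopA t gene_threshold taxa_subset taxa_strict sp_flag (gene_flag + 1)
    else
      pvLoopA t gene_threshold taxa_subset taxa_strict sp_flag gene_flag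

def frequency_filter (species_frequency_dic : List (String × Int)) (gene_threshold : Int) (sp_threshold : Int) (taxa_subset : Option (List String)) (taxa_strict : Option Bool) : Int × Int :=
  let focal_species : List String :=
    match taxa_subset with
    | some ts => ts.filter (fun sp => species_frequency_dic.any (fun p => p.1 == sp))
    | none => species_frequency_dic.map Prod.fst
  let sp_frequency_flag : Int := if (focal_species.length : Int) ≤ sp_threshold then 1 else 0
  pvLoopA species_frequency_dic gene_threshold taxa_subset taxa_strict sp_frequency_flag 0

-- ===== PORT B =====
-- the while loop 'while gene < len(vals) and vals[gene] > g: gene += 1' as structural recursion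
-- over the sorted value list (the loop walks the list front to back and stops at the first failure)
def pvScanB (vals : List Int) (gene_threshold : Int) : Int :=
  match vals with
  | [] => 0
  | v :: t => if v > gene_threshold then 1 + pvScanB t gene_threshold else 0

def frequency_filter_alt (species_frequency_dic : List (String × Int)) (gene_threshold : Int) (sp_threshold : Int) (taxa_subset : Option (List String)) (taxa_strict : Option Bool) : Int × Int :=
  let focal_species : List String :=
    match taxa_subset with
    | some ts => ts.filter (fun sp => species_frequency_dic.any (fun p => p.1 == sp))
    | none => species_frequency_dic.map Prod.fst
  let sp_frequency_flag : Int := if (focal_species.length : Int) ≤ sp_threshold then 1 else 0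
  if taxa_strict = none ∧ species_frequency_dic ≠ [] ∧
      ¬ PySem.Set.isdisjoint (PySem.Set.ofList (species_frequency_dic.map Prod.fst)) (taxa_subset.getD []) = true then
    (0, sp_frequency_flag)
  else
    (pvScanB (PySem.List.sorted (species_frequency_dic.map Prod.snd) (fun x => x) true) gene_threshold, sp_frequency_flag)

-- ===== PRECONDITION & SPEC =====
-- Pre_ excludes only the inputs where A raises TypeError: taxa_strict == None and
-- taxa_subset == None with a non-empty dict ('species in None').
def Pre_frequency_filter (species_frequency_dic : List (String × Int)) (gene_threshold : Int) (sp_threshold : Int) (taxa_subset : Option (List String)) (taxa_strict : Option Bool) : Prop :=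
  taxa_strict = none → taxa_subset = none → species_frequency_dic = []
instance (species_frequency_dic : List (String × Int)) (gene_threshold : Int) (sp_threshold : Int) (taxa_subset : Option (List String)) (taxa_strict : Option Bool) : Decidable (Pre_frequency_filter species_frequency_dic gene_threshold sp_threshold taxa_subset taxa_strict) := by unfold Pre_frequency_filter; infer_instance

def pvWitness_frequency_filter : (List (String × Int)) × Int × Int × Option (List String) × Option Bool :=
  ([("a", 1), ("b", 5)], 2, 1, some ["b", "c"], none)

def Spec_frequency_filter (species_frequency_dic : List (String × Int)) (gene_threshold : Int) (sp_threshold : Int) (taxa_subset : Option (List String)) (taxa_strict : Option Bool) (out : Int × Int) : Prop := out = frequency_filter_alt species_frequency_dic gene_threshold sp_threshold taxa_subset taxa_strict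
instance (species_frequency_dic : List (String × Int)) (gene_threshold : Int) (sp_threshold : Int) (taxa_subset : Option (List String)) (taxa_strict : Option Bool) (out : Int × Int) : Decidable (Spec_frequency_filter species_frequency_dic gene_threshold sp_threshold taxa_subset taxa_strict out) := by unfold Spec_frequency_filter; infer_instance

-- ===== CLAIM (what is proved, stated in full; the proofs are below) =====
def Claim_equal_frequency_filter : Prop := ∀ (species_frequency_dic : List (String × Int)) (gene_threshold : Int) (sp_threshold : Int) (taxa_subset : Option (List String)) (taxa_strict : Option Bool), Dom_frequency_filter species_frequency_dic gene_threshold sp_threshold taxa_subset taxa_strict → Pre_frequency_filter species_frequency_dic gene_threshold sp_threshold taxa_subset taxa_strict → Spec_frequency_filter species_frequency_dic gene_threshold sp_threshold taxa_subset taxa_strict (frequency_filter species_frequency_dic gene_threshold sp_threshold taxa_subset taxa_strict)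

-- ===== LEMMAS AND PROOFS =====
-- A's loop computes: early exit (0, sp) if some key lies in the subset, else the filter count.
theorem pvLoopA_eq (rest : List (String × Int)) (g : Int) (ts : Option (List String)) (strict : Option Bool) (sp_flag acc : Int) :
    pvLoopA rest g ts strict sp_flag acc =
      if strict = none ∧ rest.any (fun p => (ts.getD []).contains p.1) then (0, sp_flag)
      else (acc + ((rest.filter (fun p => p.2 > g)).length : Int), sp_flag) := by
  induction rest generalizing acc with
  | nil => simp [pvLoopA]
  | cons h t ih =>
    obtain ⟨species, frequency⟩ := h
    simp only [pvLoopA, List.any_cons, List.filter_cons]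
    by_cases hs : strict = none ∧ (ts.getD []).contains species
    · obtain ⟨h1, h2⟩ := hs
      subst h1
      simp at h2
      simp [h2]
    · rw [if_neg hs]
      by_cases hf : frequency > g
      · rw [if_pos hf, ih]
        by_cases h2 : strict = none ∧ t.any (fun p => (ts.getD []).contains p.1) = true
        · rw [if_pos h2, if_pos (by simp only [Bool.or_eq_true]; exact ⟨h2.1, Or.inr h2.2⟩)]
        · have : ¬ (strict = none ∧ ((ts.getD []).contains species = true ∨ t.any (fun p => (ts.getD []).contains p.1) = true)) := by
            rintro ⟨h1, h3 | h3⟩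
            · exact hs ⟨h1, h3⟩
            · exact h2 ⟨h1, h3⟩
          rw [if_neg h2, if_neg (by simp only [Bool.or_eq_true]; exact this)]
          simp [hf]
          omega
      · rw [if_neg hf, ih]
        by_cases h2 : strict = none ∧ t.any (fun p => (ts.getD []).contains p.1) = true
        · rw [if_pos h2, if_pos (by simp only [Bool.or_eq_true]; exact ⟨h2.1, Or.inr h2.2⟩)]
        · have : ¬ (strict = none ∧ ((ts.getD []).contains species = true ∨ t.any (fun p => (ts.getD []).contains p.1) = true)) := by
            rintro ⟨h1, h3 | h3⟩
            · exact hs ⟨h1, h3⟩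
            · exact h2 ⟨h1, h3⟩
          rw [if_neg h2, if_neg (by simp only [Bool.or_eq_true]; exact this)]
          simp [hf]

-- A's early-exit condition coincides with B's non-emptiness + set-overlap test.
theorem guard_iff (dic : List (String × Int)) (t : List String) :
    dic.any (fun p => t.contains p.1) = true ↔
      (dic ≠ [] ∧ ¬ PySem.Set.isdisjoint (PySem.Set.ofList (dic.map Prod.fst)) t = true) := by
  simp only [PySem.Set.isdisjoint, Bool.not_eq_true', Bool.not_eq_false, List.any_eq_true]
  constructor
  · rintro ⟨p, hp, hc⟩
    refine ⟨(by rintro rfl; cases hp), p.1, ?_, ?_⟩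
    · exact (PySem.Set.mem_ofList _ _).mpr (List.mem_map_of_mem hp)
    · simpa [PySem.Set.contains] using hc
  · rintro ⟨-, x, hx, hc⟩
    obtain ⟨p, hp, rfl⟩ := List.mem_map.mp ((PySem.Set.mem_ofList _ _).mp hx)
    exact ⟨p, hp, by simpa [PySem.Set.contains] using hc⟩

-- the prefix scan of a descending list counts all elements above the threshold
theorem pvScanB_pairwise (g : Int) (l : List Int) (hl : l.Pairwise (fun a b => b ≤ a)) :
    pvScanB l g = (l.countP (fun v => decide (g < v)) : Int) := by
  induction l with
  | nil => simp [pvScanB]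
  | cons v t ih =>
    rw [List.pairwise_cons] at hl
    obtain ⟨hall, ht⟩ := hl
    by_cases hv : v > g
    · simp [pvScanB, hv, ih ht]
      omega
    · have h0 : t.countP (fun v => decide (g < v)) = 0 := by
        rw [List.countP_eq_zero]
        intro a ha
        simp only [decide_eq_true_eq, not_lt]
        exact le_trans (hall a ha) (le_of_not_gt hv)
      simp [pvScanB, hv, h0]

theorem countB_eq (dic : List (String × Int)) (g : Int) :
    pvScanB (PySem.List.sorted (dic.map Prod.snd) (fun x => x) true) g
      = ((dic.filter (fun p => p.2 > g)).length : Int) := by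
  rw [pvScanB_pairwise g _ (by simpa using PySem.List.sorted_pairwise_rev (dic.map Prod.snd) (fun x => x))]
  congr 1
  rw [(PySem.List.sorted_perm (dic.map Prod.snd) (fun x => x) true).countP_eq, List.countP_map,
    List.countP_eq_length_filter]
  rfl

-- ===== VERDICT (by name: the statement is the Claim_ definition above) =====
theorem frequency_filter_spec : Claim_equal_frequency_filter := by
  intro dic g sp ts strict _ _
  unfold Spec_frequency_filter frequency_filter frequency_filter_alt
  simp only [pvLoopA_eq]
  have hiff := guard_iff dic (ts.getD [])
  by_cases hG : strict = none ∧ dic.any (fun p => (ts.getD []).contains p.1) = true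
  · have hB : strict = none ∧ dic ≠ [] ∧
        ¬ PySem.Set.isdisjoint (PySem.Set.ofList (dic.map Prod.fst)) (ts.getD []) = true :=
      ⟨hG.1, hiff.mp hG.2⟩
    rw [if_pos hG, if_pos hB]
  · have hB : ¬ (strict = none ∧ dic ≠ [] ∧
        ¬ PySem.Set.isdisjoint (PySem.Set.ofList (dic.map Prod.fst)) (ts.getD []) = true) :=
      fun h => hG ⟨h.1, hiff.mpr h.2⟩
    rw [if_neg hG, if_neg hB, countB_eq]
    simp
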